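-- pv_equiv track=rewrite | github.com/jiyoungzero/2023-Codingtest-Study | shynnn/구현/boj_17269이름궁합테스트.py | lov
-- ===== SOURCE A (Python) =====
-- def lov(arr):
--     length = len(arr)
--     result = []
--     for i in range(length-1):
--         temp = arr[i]+arr[i+1]
--         if temp >= 10:
--             temp = temp % 10
--         result.append(temp)
--
--     if len(result) > 2:
--         result = lov(result)  # 재귀
--
--     return result
-- ===== SOURCE B (Python) =====
-- def lov(arr):
--     # One pass over arr maintaining the right edge (anti-diagonal) of the
--     # reduction triangle, instead of recomputing shrinking rows recursively.
--     n = len(arr)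
--     if n <= 1:
--         return []
--     d = [arr[0]]          # d[k] = last element of row k of the triangle over the prefix seen so far
--     tops = []             # tops[j-1] = first element of row j (the apex of the prefix of length j+1)
--     for x in arr[1:]:
--         nd = []
--         cur = x
--         for v in d:
--             nd.append(cur)
--             t = cur + v
--             cur = t % 10 if t >= 10 else t
--         nd.append(cur)
--         d = nd
--         tops.append(cur)
--     if n == 2:
--         return [tops[-1]]
--     return [tops[-2], d[-2]]
-- ===== Notes on version B (the rewrite author's own statement) =====
-- stated objective: alternative
-- what changed: Replaces A's recursive level-by-level reduction (recompute a full shorter row, recurse until length 2) with a single left-to-right pass that incrementally maintains the anti-diagonal of the reduction triangle and records each prefix apex, assembling the answer from the recorded apexes and the final diagonal; the mod-10 binomial closed form is not exact because A leaves sums < 10 (including negative ones) un-modded, so the same O(n^2) work is organised differently (iteratively, without deep recursion).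
import Mathlib
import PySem

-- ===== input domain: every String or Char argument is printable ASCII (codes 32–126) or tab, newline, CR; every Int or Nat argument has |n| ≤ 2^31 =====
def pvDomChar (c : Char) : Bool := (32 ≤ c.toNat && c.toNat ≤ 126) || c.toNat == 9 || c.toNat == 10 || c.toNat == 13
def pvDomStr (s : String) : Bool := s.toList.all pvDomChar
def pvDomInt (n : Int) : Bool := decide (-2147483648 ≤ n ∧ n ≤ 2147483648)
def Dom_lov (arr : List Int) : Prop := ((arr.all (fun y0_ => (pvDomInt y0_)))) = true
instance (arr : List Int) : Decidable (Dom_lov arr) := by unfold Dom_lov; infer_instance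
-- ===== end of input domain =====

-- B replaces A's recursive level-by-level reduction by a single left-to-right pass maintaining
-- the reduction triangle's anti-diagonal (alternative algorithm, same asymptotic cost);
-- the theorems prove the return values equal on all inputs.

-- ===== PORT A =====
-- one level of A's loop: 'for i in range(length-1): temp = arr[i]+arr[i+1]; ...; result.append(temp)'
-- (both indices i and i+1 are always in range, so the pyGetD default 0 is never consulted)
def lovStep (arr : List Int) : List Int :=
  (PySem.List.pyRange 0 ((arr.length : Int) - 1) 1).foldl
    (fun result i =>
      let temp := PySem.List.pyGetD arr i 0 + PySem.List.pyGetD arr (i + 1) 0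
      let temp := if temp ≥ 10 then PySem.Int.mod temp 10 else temp
      result ++ [temp]) []

-- needed by lov's decreasing_by (each level shortens the list by one)
theorem lovStep_length (arr : List Int) : (lovStep arr).length = arr.length - 1 := by
  unfold lovStep
  rw [PySem.List.foldl_append_singleton_eq_map]
  simp [PySem.List.length_pyRange_one]

def lov (arr : List Int) : List Int :=
  let result := lovStep arr
  if 2 < result.length then lov result else result
termination_by arr.length
decreasing_by
  have h := lovStep_length arr
  simp only [result] at *
  omega

-- ===== PORT B =====
def lov_alt (arr : List Int) : List Int :=
  if arr.length ≤ 1 then []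
  else
    let s := (PySem.List.slice arr (some 1) none).foldl
      (fun (s : List Int × List Int) x =>
        let inner := s.1.foldl
          (fun (q : List Int × Int) v =>
            let t := q.2 + v
            (q.1 ++ [q.2], if t ≥ 10 then PySem.Int.mod t 10 else t)) ([], x)
        let nd := inner.1 ++ [inner.2]
        (nd, s.2 ++ [inner.2]))
      ([PySem.List.pyGetD arr 0 0], [])
    if arr.length = 2 then [PySem.List.pyGetD s.2 (-1) 0]
    else [PySem.List.pyGetD s.2 (-2) 0, PySem.List.pyGetD s.1 (-2) 0]

-- ===== PRECONDITION & SPEC =====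
def Spec_lov (arr : List Int) (out : List Int) : Prop := out = lov_alt arr
instance (arr : List Int) (out : List Int) : Decidable (Spec_lov arr out) := by unfold Spec_lov; infer_instance

-- ===== CLAIM (what is proved, stated in full; the proofs are below) =====
def Claim_equal_lov : Prop := ∀ (arr : List Int), Dom_lov arr → Spec_lov arr (lov arr)

-- ===== LEMMAS AND PROOFS =====

-- the digit-combining rule both programs apply to each adjacent sum
def lovRule (t : Int) : Int := if t ≥ 10 then PySem.Int.mod t 10 else t

-- structural form of one reduction level
def zw : List Int → List Int
  | a :: b :: t => lovRule (a + b) :: zw (b :: t)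
  | _ => []

theorem zw_length (xs : List Int) : (zw xs).length = xs.length - 1 := by
  match xs with
  | [] => rfl
  | [a] => rfl
  | a :: b :: t => simp [zw, zw_length (b :: t)]

theorem mapRange_zw (arr : List Int) :
    (List.range (arr.length - 1)).map (fun k => lovRule (arr.getD k 0 + arr.getD (k+1) 0)) = zw arr := by
  match arr with
  | [] => rfl
  | [a] => rfl
  | a :: b :: t =>
    have ih := mapRange_zw (b :: t)
    simp only [List.length_cons, Nat.add_sub_cancel] at ih ⊢
    rw [List.range_succ_eq_map]
    simp only [List.map_cons, List.map_map, zw]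
    rw [← ih]
    congr 1

theorem lovStep_eq_zw (arr : List Int) : lovStep arr = zw arr := by
  unfold lovStep
  rw [PySem.List.foldl_append_singleton_eq_map, PySem.List.pyRange_one]
  rw [← mapRange_zw arr]
  have h1 : ((arr.length : Int) - 1 - 0).toNat = arr.length - 1 := by omega
  simp only [List.nil_append, List.map_map, h1]
  apply List.map_congr_left
  intro k hk
  simp only [Function.comp, zero_add, lovRule]
  have h2 : ((k : Int) + 1) = ((k + 1 : Nat) : Int) := by push_cast; ring
  rw [h2, PySem.List.pyGetD_natCast, PySem.List.pyGetD_natCast]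

-- A computes the (n-2)-fold reduction for n ≥ 3
theorem lov_eq_iter : ∀ (n : Nat) (arr : List Int), arr.length = n → 3 ≤ n →
    lov arr = zw^[n - 2] arr := by
  intro n
  induction n using Nat.strong_induction_on with
  | _ n ih =>
    intro arr hlen h3
    rw [lov]
    simp only [lovStep_eq_zw, zw_length, hlen]
    by_cases h4 : 4 ≤ n
    · rw [if_pos (by omega)]
      rw [ih (n - 1) (by omega) (zw arr) (by rw [zw_length, hlen]) (by omega)]
      rw [← Function.iterate_succ_apply]
      congr 1
      omega
    · rw [if_neg (by omega)]
      have hn3 : n = 3 := by omega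
      subst hn3
      rfl

theorem zw_iter_length (k : Nat) (xs : List Int) : (zw^[k] xs).length = xs.length - k := by
  induction k generalizing xs with
  | zero => simp
  | succ k ih =>
    rw [Function.iterate_succ_apply, ih, zw_length]
    omega

theorem zw_iter_ne_nil (k : Nat) (p : List Int) (h : k < p.length) : zw^[k] p ≠ [] := by
  have := zw_iter_length k p
  intro hc; rw [hc] at this; simp at this; omega

theorem zw_iter_full_nil (p : List Int) : zw^[p.length] p = [] := by
  have := zw_iter_length p.length p
  exact List.eq_nil_of_length_eq_zero (by omega)

-- appending one element extends one reduction level by one element on the right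
theorem zw_append (xs : List Int) (x : Int) (h : xs ≠ []) :
    zw (xs ++ [x]) = zw xs ++ [lovRule (xs.getLastD 0 + x)] := by
  match xs with
  | [a] => rfl
  | a :: b :: t =>
    have ih := zw_append (b :: t) x (by simp)
    simp only [List.cons_append, zw] at ih ⊢
    rw [ih]
    simp

-- appending one element extends every row of the triangle by one element on the right
theorem zw_iter_append (p : List Int) (x : Int) (k : Nat) (hk : k ≤ p.length) :
    ∃ y, zw^[k] (p ++ [x]) = zw^[k] p ++ [y] := by
  induction k with
  | zero => exact ⟨x, rfl⟩
  | succ k ih =>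
    obtain ⟨y, hy⟩ := ih (Nat.le_of_succ_le hk)
    have hne : zw^[k] p ≠ [] := zw_iter_ne_nil k p (by omega)
    refine ⟨lovRule ((zw^[k] p).getLastD 0 + y), ?_⟩
    rw [Function.iterate_succ_apply', hy, zw_append _ _ hne, Function.iterate_succ_apply']

-- the anti-diagonal of the reduction triangle over p (B's running state d)
def diag (p : List Int) : List Int :=
  (List.range p.length).map (fun k => (zw^[k] p).getLastD 0)

-- apexes of the proper prefixes of p (B's running state tops)
def tops (p : List Int) : List Int :=
  (List.range (p.length - 1)).map (fun j => (zw^[j + 1] p).headD 0)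

-- B's inner-loop body, named (definitionally the lambda inside lov_alt)
def innerF (q : List Int × Int) (v : Int) : List Int × Int :=
  let t := q.2 + v
  (q.1 ++ [q.2], if t ≥ 10 then PySem.Int.mod t 10 else t)

-- B's outer-loop body, named (definitionally the lambda inside lov_alt)
def outerF (s : List Int × List Int) (x : Int) : List Int × List Int :=
  let inner := s.1.foldl innerF ([], x)
  let nd := inner.1 ++ [inner.2]
  (nd, s.2 ++ [inner.2])

-- the diagonal recurrence: next diagonal entry from the current one and the old diagonal entry
theorem diag_rec (p : List Int) (x : Int) (k : Nat) (hk : k < p.length) :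
    (zw^[k + 1] (p ++ [x])).getLastD 0
      = lovRule ((zw^[k] (p ++ [x])).getLastD 0 + (zw^[k] p).getLastD 0) := by
  obtain ⟨y, hy⟩ := zw_iter_append p x k (Nat.le_of_lt hk)
  rw [Function.iterate_succ_apply', hy, zw_append _ _ (zw_iter_ne_nil k p hk)]
  simp [add_comm]

-- B's inner loop turns the old diagonal into the new one, entry by entry
theorem inner_fold (p : List Int) (x : Int) (m : Nat) (hm : m ≤ p.length) :
    (((List.range m).map (fun k => (zw^[k] p).getLastD 0)).foldl innerF ([], x))
      = ((List.range m).map (fun k => (zw^[k] (p ++ [x])).getLastD 0),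
         (zw^[m] (p ++ [x])).getLastD 0) := by
  induction m with
  | zero => simp
  | succ m ih =>
    rw [List.range_succ, List.map_append, List.map_append, List.foldl_append,
        ih (Nat.le_of_succ_le hm)]
    simp only [List.map_cons, List.map_nil, List.foldl_cons, List.foldl_nil, innerF]
    rw [diag_rec p x m (Nat.lt_of_succ_le hm)]
    rfl

theorem headD_append_ne (xs : List Int) (y d : Int) (h : xs ≠ []) :
    (xs ++ [y]).headD d = xs.headD d := by
  cases xs with
  | nil => exact absurd rfl h
  | cons a t => rfl

theorem tops_append (p : List Int) (x : Int) (h : p ≠ []) :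
    tops (p ++ [x]) = tops p ++ [(zw^[p.length] (p ++ [x])).getLastD 0] := by
  have hp : 1 ≤ p.length := List.length_pos_of_ne_nil h
  unfold tops
  simp only [List.length_append, List.length_singleton]
  have h1 : p.length + 1 - 1 = (p.length - 1) + 1 := by omega
  rw [h1, List.range_succ, List.map_append]
  congr 1
  · apply List.map_congr_left
    intro j hj
    simp only [List.mem_range] at hj
    obtain ⟨y, hy⟩ := zw_iter_append p x (j + 1) (by omega)
    rw [hy, headD_append_ne _ _ _ (zw_iter_ne_nil (j + 1) p (by omega))]
  · simp only [List.map_cons, List.map_nil]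
    obtain ⟨y, hy⟩ := zw_iter_append p x p.length (le_refl _)
    have h2 : p.length - 1 + 1 = p.length := by omega
    rw [h2, hy, zw_iter_full_nil p]
    rfl

-- one outer-loop step advances both running states by one consumed element
theorem outer_step (p : List Int) (x : Int) (h : p ≠ []) :
    outerF (diag p, tops p) x = (diag (p ++ [x]), tops (p ++ [x])) := by
  have ht := tops_append p x h
  unfold outerF diag
  rw [inner_fold p x p.length (le_refl _)]
  rw [ht]
  simp only [List.length_append, List.length_singleton, List.range_succ, List.map_append,
    List.map_cons, List.map_nil]

-- the outer loop: after consuming r, the states are the diagonal and apexes of p ++ r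
theorem outer_fold (r p : List Int) (h : p ≠ []) :
    r.foldl outerF (diag p, tops p) = (diag (p ++ r), tops (p ++ r)) := by
  induction r generalizing p with
  | nil => simp
  | cons x r ih =>
    rw [List.foldl_cons, outer_step p x h, ih (p ++ [x]) (by simp)]
    simp

theorem list_eq_pair (xs : List Int) (h : xs.length = 2) :
    xs = [xs.headD 0, xs.getLastD 0] := by
  match xs with
  | [u, v] => rfl

-- ===== VERDICT (by name: the statement is the Claim_ definition above) =====
theorem diag_tops_singleton (a : Int) : ([a], ([] : List Int)) = (diag [a], tops [a]) := by
  simp [diag, tops]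

theorem lov_spec : Claim_equal_lov := by
  unfold Claim_equal_lov Spec_lov
  intro arr _
  by_cases h1 : arr.length ≤ 1
  · rw [lov]
    have hz : zw arr = [] := List.eq_nil_of_length_eq_zero (by rw [zw_length]; omega)
    simp only [lovStep_eq_zw, hz]
    rw [if_neg (by simp)]
    unfold lov_alt
    rw [if_pos h1]
  · by_cases h2 : arr.length = 2
    · match arr, h2 with
      | [a, b], _ =>
        rw [lov, lovStep_eq_zw]
        rw [show zw [a, b] = [lovRule (a + b)] from rfl]
        rw [if_neg (by simp)]
        simp only [lov_alt, PySem.List.slice_from_one]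
        norm_num [List.foldl]
        simp [pysem, lovRule, add_comm]
    · have h3 : 3 ≤ arr.length := by omega
      obtain ⟨a, rest, rfl⟩ : ∃ a rest, arr = a :: rest := by
        match arr with
        | a :: rest => exact ⟨a, rest, rfl⟩
        | [] => simp at h3
      rw [lov_eq_iter (a :: rest).length _ rfl h3]
      unfold lov_alt
      rw [if_neg (by omega)]
      rw [show (fun (s : List Int × List Int) x =>
        let inner := s.1.foldl
          (fun (q : List Int × Int) v =>
            let t := q.2 + v
            (q.1 ++ [q.2], if t ≥ 10 then PySem.Int.mod t 10 else t)) ([], x)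
        let nd := inner.1 ++ [inner.2]
        (nd, s.2 ++ [inner.2])) = outerF from rfl]
      rw [PySem.List.slice_from_one, PySem.List.pyGetD_zero_cons]
      rw [show ([a], ([] : List Int)) = (diag [a], tops [a]) from diag_tops_singleton a]
      rw [show (a :: rest).tail = rest from rfl]
      rw [outer_fold rest [a] (by simp)]
      simp only [List.singleton_append]
      rw [if_neg h2]
      have hn : (a :: rest).length = rest.length + 1 := by simp
      have htl : (tops (a :: rest)).length = rest.length := by
        simp [tops]
      have hdl : (diag (a :: rest)).length = rest.length + 1 := by
        simp [diag]
      have hpair : (zw^[(a :: rest).length - 2] (a :: rest)).length = 2 := by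
        rw [zw_iter_length]
        omega
      rw [PySem.List.pyGetD_neg_ofNat _ 2 0 (by omega) (by rw [htl]; omega)]
      rw [PySem.List.pyGetD_neg_ofNat _ 2 0 (by omega) (by rw [hdl]; omega)]
      rw [list_eq_pair _ hpair]
      simp only [tops, diag, List.length_map, List.length_range, List.getElem_map,
        List.getElem_range, List.length_cons]
      have e1 : rest.length + 1 - 1 - 2 + 1 = rest.length + 1 - 2 := by omega
      rw [e1]
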